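-- pv_equiv track=rewrite | github.com/zburstein/CodeFights-Code | Intro/Island of Knowledge/avoidObstacles/code.py | avoidObstacles
-- ===== SOURCE A (Python) =====
-- def avoidObstacles(inputArray):
--     dividend = 1
--     calculating = True
--     while calculating:
--         calculating = False
--         for x in inputArray:
--             if x % dividend == 0:
--                 dividend += 1
--                 calculating = True
--                 break
--     return dividend
-- ===== SOURCE B (Python) =====
-- def avoidObstacles(inputArray):
--     divisors = set()
--     for x in inputArray:
--         v = abs(x)
--         i = 1
--         while i * i <= v:
--             if v % i == 0:
--                 divisors.add(i)
--                 divisors.add(v // i)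
--             i += 1
--     k = 1
--     while k in divisors:
--         k += 1
--     return k
-- ===== Notes on version B (the rewrite author's own statement) =====
-- stated objective: alternative
-- what changed: B makes one pass collecting every divisor of each obstacle's absolute value into a set (trial division up to sqrt(v)), then returns the first positive integer not in that set, instead of A's re-scan of the whole array with a modulo test per element for every candidate jump.
-- outside the precondition, e.g. on avoidObstacles([0, 3]): A does not finish within the time limit, B returns 2
import Mathlib
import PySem

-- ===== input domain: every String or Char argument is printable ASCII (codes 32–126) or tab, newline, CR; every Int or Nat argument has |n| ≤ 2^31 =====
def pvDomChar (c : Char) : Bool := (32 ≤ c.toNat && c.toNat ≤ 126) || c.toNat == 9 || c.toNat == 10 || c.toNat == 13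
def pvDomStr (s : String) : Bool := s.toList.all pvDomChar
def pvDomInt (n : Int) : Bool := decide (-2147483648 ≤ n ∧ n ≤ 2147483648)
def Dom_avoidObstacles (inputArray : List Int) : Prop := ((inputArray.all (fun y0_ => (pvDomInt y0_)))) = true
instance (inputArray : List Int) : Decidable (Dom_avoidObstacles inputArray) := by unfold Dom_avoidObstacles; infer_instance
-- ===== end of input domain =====

-- B replaces A's per-candidate modulo scan of the whole array by one divisor-set pass (all divisors of the
-- obstacles' absolute values, O(√v) each), then counts up past that set (alternative decomposition, exact
-- same result on the stated domain).

-- ===== PORT A =====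
-- the inner 'for x in inputArray: if x % dividend == 0: … break'
def avoidObstacles.hit (d : Int) : List Int → Bool
  | [] => false
  | x :: xs => if PySem.Int.mod x d == 0 then true else avoidObstacles.hit d xs

-- the 'while calculating' loop; fuel only makes the while-loop total (exact under Pre_)
def avoidObstacles.loop (arr : List Int) : Nat → Int → Int
  | 0, d => d
  | f + 1, d => if avoidObstacles.hit d arr then avoidObstacles.loop arr f (d + 1) else d

def avoidObstacles (inputArray : List Int) : Int :=
  avoidObstacles.loop inputArray ((inputArray.map Int.natAbs).foldl max 0 + 2) 1

-- ===== PORT B =====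
-- 'i = 1; while i * i <= v: if v % i == 0: add i and v // i; i += 1'; fuel only makes it total
def avoidObstacles_alt.divLoop (v : Int) : Nat → Int → PySem.Set Int → PySem.Set Int
  | 0, _, D => D
  | f + 1, i, D =>
      if i * i ≤ v then
        avoidObstacles_alt.divLoop v f (i + 1)
          (if PySem.Int.mod v i == 0 then (D.add i).add (PySem.Int.floordiv v i) else D)
      else D

-- 'for x in inputArray: …' collecting every divisor of abs(x)
def avoidObstacles_alt.buildD (arr : List Int) : PySem.Set Int :=
  arr.foldl (fun D x => avoidObstacles_alt.divLoop |x| (|x|.toNat + 1) 1 D) PySem.Set.empty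

-- 'k = 1; while k in divisors: k += 1'; fuel only makes it total
def avoidObstacles_alt.kLoop (D : PySem.Set Int) : Nat → Int → Int
  | 0, k => k
  | f + 1, k => if PySem.Set.contains D k then avoidObstacles_alt.kLoop D f (k + 1) else k

def avoidObstacles_alt (inputArray : List Int) : Int :=
  let D := avoidObstacles_alt.buildD inputArray
  avoidObstacles_alt.kLoop D (D.length + 2) 1

-- ===== PRECONDITION & SPEC =====
-- Pre_ excludes arrays containing 0: there Python A loops forever (0 % d == 0 for every d), so A never returns.
def Pre_avoidObstacles (inputArray : List Int) : Prop := (0 : Int) ∉ inputArray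
instance (inputArray : List Int) : Decidable (Pre_avoidObstacles inputArray) := by unfold Pre_avoidObstacles; infer_instance
def pvWitness_avoidObstacles : List Int := [5, 3, 6, 7, 9]

def Spec_avoidObstacles (inputArray : List Int) (out : Int) : Prop := out = avoidObstacles_alt inputArray
instance (inputArray : List Int) (out : Int) : Decidable (Spec_avoidObstacles inputArray out) := by unfold Spec_avoidObstacles; infer_instance

-- ===== CLAIM (what is proved, stated in full; the proofs are below) =====
def Claim_equal_avoidObstacles : Prop := ∀ (inputArray : List Int), Dom_avoidObstacles inputArray → Pre_avoidObstacles inputArray → Spec_avoidObstacles inputArray (avoidObstacles inputArray)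

-- ===== LEMMAS AND PROOFS =====

-- a count-up loop 'while c: step += 1' reaches the least stopping point, given enough fuel
theorem climb_spec (c : Int → Bool) (L : Nat → Int → Int)
    (hS : ∀ f d, L (f + 1) d = if c d then L f (d + 1) else d) :
    ∀ (f i : Nat) (d : Int), i < f → (∀ j : Nat, j < i → c (d + j) = true) →
      c (d + i) = false → L f d = d + i := by
  intro f
  induction f with
  | zero => intro i d hi; omega
  | succ f ih =>
    intro i d hi hlt hstop
    rw [hS]
    cases i with
    | zero =>
      have : c d = false := by simpa using hstop
      simp [this]
    | succ i' =>
      have h0' : c d = true := by simpa using hlt 0 (by omega)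
      rw [h0']
      simp only [if_true]
      have := ih i' (d + 1) (by omega)
        (fun j hj => by
          have h := hlt (j + 1) (by omega)
          rw [← h]; congr 1; push_cast; ring)
        (by rw [← hstop]; congr 1; push_cast; ring)
      rw [this]; push_cast; ring

theorem hit_iff (d : Int) (arr : List Int) :
    avoidObstacles.hit d arr = true ↔ ∃ x ∈ arr, d ∣ x := by
  induction arr with
  | nil => simp [avoidObstacles.hit]
  | cons x xs ih =>
    simp only [avoidObstacles.hit]
    by_cases h : PySem.Int.mod x d = 0
    · simp [h, (PySem.Int.mod_eq_zero_iff_dvd x d).mp h]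
    · have hnd : ¬ d ∣ x := fun hd => h ((PySem.Int.mod_eq_zero_iff_dvd x d).mpr hd)
      simp [h, ih, hnd]

-- what the divisor loop collects
theorem divLoop_mem (v : Int) (f : Nat) :
    ∀ (i0 : Int) (D : PySem.Set Int) (j : Int), 1 ≤ i0 → v < (i0 + f) * (i0 + f) →
      (j ∈ avoidObstacles_alt.divLoop v f i0 D ↔
        j ∈ D ∨ ∃ i : Int, i0 ≤ i ∧ i * i ≤ v ∧ i ∣ v ∧ (j = i ∨ j = PySem.Int.floordiv v i)) := by
  induction f with
  | zero =>
    intro i0 D j hi0 hf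
    simp only [avoidObstacles_alt.divLoop]
    constructor
    · exact Or.inl
    · rintro (h | ⟨i, hi, hii, _⟩)
      · exact h
      · exfalso
        have : i0 * i0 ≤ i * i := by nlinarith
        simp at hf; nlinarith
  | succ f ih =>
    intro i0 D j hi0 hf
    simp only [avoidObstacles_alt.divLoop]
    split
    · rename_i hle
      rw [ih (i0 + 1) _ j (by omega) (by push_cast at hf ⊢; nlinarith)]
      by_cases hdvd : PySem.Int.mod v i0 = 0
      · have hd : i0 ∣ v := (PySem.Int.mod_eq_zero_iff_dvd v i0).mp hdvd
        simp only [hdvd]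
        simp only [beq_self_eq_true, if_true, PySem.Set.mem_add]
        constructor
        · rintro (((h | h) | h) | ⟨i, h1, h2, h3, h4⟩)
          · exact Or.inl h
          · exact Or.inr ⟨i0, le_refl _, hle, hd, Or.inl h⟩
          · exact Or.inr ⟨i0, le_refl _, hle, hd, Or.inr h⟩
          · exact Or.inr ⟨i, by omega, h2, h3, h4⟩
        · rintro (h | ⟨i, h1, h2, h3, h4⟩)
          · exact Or.inl (Or.inl (Or.inl h))
          · rcases eq_or_lt_of_le h1 with heq | hlt
            · rcases h4 with h4 | h4
              · exact Or.inl (Or.inl (Or.inr (heq ▸ h4)))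
              · exact Or.inl (Or.inr (heq ▸ h4))
            · exact Or.inr ⟨i, by omega, h2, h3, h4⟩
      · have hnd : ¬ i0 ∣ v := fun hd => hdvd ((PySem.Int.mod_eq_zero_iff_dvd v i0).mpr hd)
        have : (PySem.Int.mod v i0 == 0) = false := by simpa using hdvd
        simp only [this]
        constructor
        · rintro (h | ⟨i, h1, h2, h3, h4⟩)
          · exact Or.inl h
          · exact Or.inr ⟨i, by omega, h2, h3, h4⟩
        · rintro (h | ⟨i, h1, h2, h3, h4⟩)
          · exact Or.inl h
          · rcases eq_or_lt_of_le h1 with heq | hlt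
            · exact absurd (heq ▸ h3) hnd
            · exact Or.inr ⟨i, by omega, h2, h3, h4⟩
    · rename_i hgt
      push Not at hgt
      constructor
      · exact Or.inl
      · rintro (h | ⟨i, h1, h2, _⟩)
        · exact h
        · exfalso
          have : i0 * i0 ≤ i * i := by nlinarith
          nlinarith

-- every divisor of v ≥ 1 shows up as i or v // i with i² ≤ v
theorem divisor_pair (v k : Int) (hv : 1 ≤ v) (hk : 1 ≤ k) :
    k ∣ v ↔ ∃ i : Int, 1 ≤ i ∧ i * i ≤ v ∧ i ∣ v ∧ (k = i ∨ k = PySem.Int.floordiv v i) := by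
  constructor
  · intro hdvd
    by_cases hsq : k * k ≤ v
    · exact ⟨k, hk, hsq, hdvd, Or.inl rfl⟩
    · push Not at hsq
      obtain ⟨e, he⟩ := hdvd
      have he1 : 1 ≤ e := by nlinarith
      have hek : e < k := by nlinarith
      refine ⟨e, he1, by nlinarith, ⟨k, by rw [he]; ring⟩, Or.inr ?_⟩
      · have h2 : PySem.Int.floordiv v e = k := by
          rw [PySem.Int.floordiv_eq_ediv_of_pos (by omega : (0:Int) < e), he, mul_comm k e]
          exact Int.mul_ediv_cancel_left k (by omega)
        exact h2.symm
  · rintro ⟨i, h1, _, h3, h4 | h4⟩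
    · exact h4 ▸ h3
    · obtain ⟨e, he⟩ := h3
      have h2 : PySem.Int.floordiv v i = e := by
        rw [PySem.Int.floordiv_eq_ediv_of_pos (by omega : (0:Int) < i), he]
        exact Int.mul_ediv_cancel_left e (by omega)
      rw [h4, h2]
      exact ⟨i, by rw [he]; ring⟩

-- membership in the accumulated divisor set
theorem buildD_mem (arr : List Int) (h0 : (0 : Int) ∉ arr) (k : Int) (hk : 1 ≤ k) :
    k ∈ avoidObstacles_alt.buildD arr ↔ ∃ x ∈ arr, k ∣ x := by
  have step : ∀ (x : Int), x ≠ 0 → ∀ (D : PySem.Set Int),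
      (k ∈ avoidObstacles_alt.divLoop |x| (|x|.toNat + 1) 1 D ↔ k ∈ D ∨ k ∣ x) := by
    intro x hx D
    have hv : 1 ≤ |x| := by
      have := abs_pos.mpr hx; omega
    rw [divLoop_mem |x| (|x|.toNat + 1) 1 D k (le_refl _)
      (by push_cast [Int.toNat_of_nonneg (abs_nonneg x)]; nlinarith)]
    rw [← divisor_pair |x| k hv hk, dvd_abs]
  have hfold : ∀ (l : List Int), (0 : Int) ∉ l → ∀ (D : PySem.Set Int),
      (k ∈ l.foldl (fun D x => avoidObstacles_alt.divLoop |x| (|x|.toNat + 1) 1 D) D ↔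
        k ∈ D ∨ ∃ x ∈ l, k ∣ x) := by
    intro l
    induction l with
    | nil => intro _ D; simp
    | cons x xs ih =>
      intro h0l D
      have hx : x ≠ 0 := fun hx0 => h0l (hx0 ▸ List.mem_cons_self ..)
      have h0' : (0 : Int) ∉ xs := fun hc => h0l (List.mem_cons_of_mem _ hc)
      simp only [List.foldl_cons]
      rw [ih h0' _, step x hx D]
      simp only [List.mem_cons]
      constructor
      · rintro ((h | h) | ⟨y, hy, hd⟩)
        · exact Or.inl h
        · exact Or.inr ⟨x, Or.inl rfl, h⟩
        · exact Or.inr ⟨y, Or.inr hy, hd⟩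
      · rintro (h | ⟨y, (rfl | hy), hd⟩)
        · exact Or.inl (Or.inl h)
        · exact Or.inl (Or.inr hd)
        · exact Or.inr ⟨y, hy, hd⟩
  have := hfold arr h0 PySem.Set.empty
  unfold avoidObstacles_alt.buildD
  rw [this]
  simp [PySem.Set.empty]

theorem avoidObstacles_spec_aux (arr : List Int) (h0 : (0 : Int) ∉ arr) :
    avoidObstacles arr = avoidObstacles_alt arr := by
  classical
  set M : Nat := (arr.map Int.natAbs).foldl max 0 with hM
  set D : PySem.Set Int := avoidObstacles_alt.buildD arr with hD
  -- every obstacle's absolute value is ≤ M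
  have hMub : ∀ x ∈ arr, x.natAbs ≤ M := by
    intro x hx
    exact (PySem.List.le_foldl_max_nat (arr.map Int.natAbs) id 0).2 x.natAbs
      (List.mem_map_of_mem hx)
  -- the two loop conditions agree on every candidate ≥ 1
  have hcond : ∀ d : Int, 1 ≤ d → avoidObstacles.hit d arr = PySem.Set.contains D d := by
    intro d hd
    rw [Bool.eq_iff_iff, hit_iff, PySem.Set.contains_iff, hD, buildD_mem arr h0 d hd]
  -- the common stopping point
  have hPM : avoidObstacles.hit (1 + (M : Int)) arr = false := by
    rw [Bool.eq_false_iff, Ne, hit_iff]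
    rintro ⟨x, hx, hdx⟩
    have hxne : x ≠ 0 := fun hx0 => h0 (hx0 ▸ hx)
    have hub : |x| ≤ (M : Int) := by
      rw [Int.abs_eq_natAbs]; exact_mod_cast hMub x hx
    have habs : (1 + (M : Int)) ∣ |x| := (dvd_abs _ x).mpr hdx
    have := Int.le_of_dvd (abs_pos.mpr hxne) habs
    omega
  have hex : ∃ n : Nat, avoidObstacles.hit (1 + (n : Int)) arr = false := ⟨M, hPM⟩
  set i : Nat := Nat.find hex with hi
  have histop : avoidObstacles.hit (1 + (i : Int)) arr = false := Nat.find_spec hex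
  have hilt : ∀ j : Nat, j < i → avoidObstacles.hit (1 + (j : Int)) arr = true := by
    intro j hj
    simpa using Nat.find_min hex hj
  have hiM : i ≤ M := Nat.find_min' hex hPM
  -- pigeonhole: 1, …, i all lie in the duplicate-free set D, so i ≤ |D|
  have hiD : i ≤ D.length := by
    have hsub : (List.range i).map (fun (j : Nat) => 1 + (j : Int)) ⊆ D := by
      intro y hy
      obtain ⟨j, hj, rfl⟩ := List.mem_map.mp hy
      have hj' := hilt j (List.mem_range.mp hj)
      rw [hcond (1 + (j : Int)) (by omega)] at hj'
      exact (PySem.Set.contains_iff D _).mp hj'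
    have hnd : ((List.range i).map (fun (j : Nat) => 1 + (j : Int))).Nodup :=
      List.Nodup.map (fun a b hab => by omega) List.nodup_range
    have := List.Subperm.length_le (List.subperm_of_subset hnd hsub)
    simpa using this
  -- A's loop reaches 1 + i
  have hA : avoidObstacles arr = 1 + (i : Int) := by
    show avoidObstacles.loop arr (M + 2) 1 = 1 + (i : Int)
    exact climb_spec (fun d => avoidObstacles.hit d arr) (avoidObstacles.loop arr)
      (fun f d => rfl) (M + 2) i 1 (by omega) hilt histop
  -- B's loop reaches 1 + i as well
  have hB : avoidObstacles_alt arr = 1 + (i : Int) := by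
    show avoidObstacles_alt.kLoop (avoidObstacles_alt.buildD arr)
      ((avoidObstacles_alt.buildD arr).length + 2) 1 = 1 + (i : Int)
    rw [← hD]
    refine climb_spec (fun k => PySem.Set.contains D k) (avoidObstacles_alt.kLoop D)
      (fun f d => rfl) (D.length + 2) i 1 (by omega) ?_ ?_
    · intro j hj
      exact (hcond (1 + (j : Int)) (by omega)).symm.trans (hilt j hj)
    · exact (hcond (1 + (i : Int)) (by omega)).symm.trans histop
  rw [hA, hB]

-- ===== VERDICT (by name: the statement is the Claim_ definition above) =====
theorem avoidObstacles_spec : Claim_equal_avoidObstacles := by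
  intro arr _ hpre
  unfold Spec_avoidObstacles
  exact avoidObstacles_spec_aux arr hpre
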